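-- pv_equiv track=rewrite | github.com/Sunbird-Serve/serve-agentic-stack | backend/server.py | determine_next_need_state
-- ===== SOURCE A (Python) =====
-- from typing import Optional, List, Dict, Any
--
-- def determine_next_need_state(
--     current_state: str,
--     user_message: str,
--     coordinator_resolved: bool,
--     school_resolved: bool,
--     missing_fields: List[str]
-- ) -> str:
--     """Determine next state for need workflow."""
--     message_lower = user_message.lower()
--
--     # Pause signals
--     pause_signals = ["pause", "stop", "later", "bye", "quit", "not now"]
--     if any(signal in message_lower for signal in pause_signals):
--         return "paused"
--
--     # Resume from pause
--     if current_state == "paused":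
--         resume_signals = ["continue", "resume", "ready", "back", "let's go"]
--         if any(signal in message_lower for signal in resume_signals):
--             if not coordinator_resolved:
--                 return "resolving_coordinator"
--             elif not school_resolved:
--                 return "resolving_school"
--             elif missing_fields:
--                 return "drafting_need"
--             else:
--                 return "pending_approval"
--
--     # State progression
--     if current_state == "initiated":
--         return "resolving_coordinator"
--
--     if current_state == "resolving_coordinator":
--         if coordinator_resolved:
--             return "resolving_school"
--         return current_state
--
--     if current_state == "resolving_school":
--         if school_resolved:
--             return "drafting_need"
--         return current_state
--
--     if current_state == "drafting_need":
--         if not missing_fields: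
--             return "pending_approval"
--         return current_state
--
--     if current_state == "pending_approval":
--         confirm_signals = ["yes", "correct", "confirm", "looks good", "that's right", "perfect", "ok", "okay", "submit"]
--         if any(signal in message_lower for signal in confirm_signals):
--             return "approved"
--         change_signals = ["no", "wrong", "change", "update", "fix", "actually"]
--         if any(signal in message_lower for signal in change_signals):
--             return "drafting_need"
--         return current_state
--
--     if current_state == "approved":
--         return "fulfillment_handoff_ready"
--
--     return current_state
-- ===== SOURCE B (Python) =====
-- PAUSE = ["pause", "stop", "later", "bye", "quit", "not now"]
-- RESUME = ["continue", "resume", "ready", "back", "let's go"]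
-- CONFIRM = ["yes", "correct", "confirm", "looks good", "that's right", "perfect", "ok", "okay", "submit"]
-- CHANGE = ["no", "wrong", "change", "update", "fix", "actually"]
--
-- # The workflow as an ordered pipeline of milestones with completion gates.
-- PIPELINE = ["initiated", "resolving_coordinator", "resolving_school",
--             "drafting_need", "pending_approval", "approved", "fulfillment_handoff_ready"]
--
--
-- def determine_next_need_state(current_state, user_message, coordinator_resolved, school_resolved, missing_fields):
--     msg = user_message.lower()
--
--     def has(signals):
--         return any(s in msg for s in signals)
--
--     if has(PAUSE):
--         return "paused"
--
--     # exit gate of each pipeline position: may this stage advance to its successor?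
--     gates = [True, coordinator_resolved, school_resolved, not missing_fields, False, True, False]
--
--     if current_state == "paused":
--         if has(RESUME):
--             # resume at the first milestone whose gate is still closed
--             for i in range(1, 4):
--                 if not gates[i]:
--                     return PIPELINE[i]
--             return "pending_approval"
--         return "paused"
--
--     if current_state == "pending_approval":
--         if has(CONFIRM):
--             return "approved"
--         if has(CHANGE):
--             return "drafting_need"
--         return current_state
--
--     # linear progression: step to the successor position when the gate is open
--     if current_state in PIPELINE:
--         i = PIPELINE.index(current_state)
--         if gates[i]:
--             return PIPELINE[i + 1]
--     return current_state
-- ===== Notes on version B (the rewrite author's own statement) =====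
-- stated objective: alternative
-- what changed: Recast the workflow as an ordered pipeline list with a parallel gate vector: normal progression becomes index-into-pipeline + step-to-successor-if-gate-open, and resume-from-paused becomes a scan for the first closed gate, instead of A's per-state if-return chain with hard-coded target states.
import Mathlib
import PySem

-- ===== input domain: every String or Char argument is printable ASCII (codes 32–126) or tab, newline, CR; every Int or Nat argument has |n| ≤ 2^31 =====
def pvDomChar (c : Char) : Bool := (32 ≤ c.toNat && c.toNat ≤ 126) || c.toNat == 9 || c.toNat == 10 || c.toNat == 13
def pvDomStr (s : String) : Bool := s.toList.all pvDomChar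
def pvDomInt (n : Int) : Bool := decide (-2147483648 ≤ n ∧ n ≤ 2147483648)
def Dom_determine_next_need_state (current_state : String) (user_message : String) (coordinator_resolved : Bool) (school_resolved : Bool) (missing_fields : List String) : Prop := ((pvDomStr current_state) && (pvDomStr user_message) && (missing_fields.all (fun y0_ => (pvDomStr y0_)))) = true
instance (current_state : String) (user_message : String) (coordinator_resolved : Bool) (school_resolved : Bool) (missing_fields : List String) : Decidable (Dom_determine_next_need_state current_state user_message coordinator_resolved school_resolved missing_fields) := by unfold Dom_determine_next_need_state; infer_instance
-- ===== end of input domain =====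

-- B recasts the workflow as an ordered pipeline list with a gate vector (index + successor step, and a first-closed-gate scan for resume) instead of A's per-state if-chain (alternative decomposition, same behaviour).


-- ===== PORT A =====
def determine_next_need_state (current_state : String) (user_message : String) (coordinator_resolved : Bool) (school_resolved : Bool) (missing_fields : List String) : String :=
  let message_lower := PySem.Str.lower user_message
  if (["pause", "stop", "later", "bye", "quit", "not now"].any (fun signal => PySem.Str.isIn signal message_lower)) then "paused"
  -- paused block: when current_state == "paused" but no resume signal matches, Python falls
  -- through to the state-progression chain below; rendered by conjoining the two conditions.
  else if (current_state == "paused" && ["continue", "resume", "ready", "back", "let's go"].any (fun signal => PySem.Str.isIn signal message_lower)) then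
    (if !coordinator_resolved then "resolving_coordinator"
     else if !school_resolved then "resolving_school"
     else if !missing_fields.isEmpty then "drafting_need"
     else "pending_approval")
  else if current_state == "initiated" then "resolving_coordinator"
  else if current_state == "resolving_coordinator" then
    (if coordinator_resolved then "resolving_school" else current_state)
  else if current_state == "resolving_school" then
    (if school_resolved then "drafting_need" else current_state)
  else if current_state == "drafting_need" then
    (if missing_fields.isEmpty then "pending_approval" else current_state)
  else if current_state == "pending_approval" then
    (if (["yes", "correct", "confirm", "looks good", "that's right", "perfect", "ok", "okay", "submit"].any (fun signal => PySem.Str.isIn signal message_lower)) then "approved"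
     else if (["no", "wrong", "change", "update", "fix", "actually"].any (fun signal => PySem.Str.isIn signal message_lower)) then "drafting_need"
     else current_state)
  else if current_state == "approved" then "fulfillment_handoff_ready"
  else current_state

-- ===== PORT B =====
-- B: ordered pipeline of milestones with a parallel gate vector.
def pvPipeline : List String :=
  ["initiated", "resolving_coordinator", "resolving_school", "drafting_need",
   "pending_approval", "approved", "fulfillment_handoff_ready"]

def pvHas (msg : String) (signals : List String) : Bool :=
  signals.any (fun s => PySem.Str.isIn s msg)

-- resume: first milestone (positions 1..3) whose gate is still closed; else pending_approval
def pvResumeScan (gates : List Bool) : String :=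
  match (PySem.List.pyRange 1 4 1).findSome?
      (fun i => if !((PySem.List.pyGet? gates i).getD false)
                then PySem.List.pyGet? pvPipeline i else none) with
  | some s => s
  | none => "pending_approval"

def determine_next_need_state_alt (current_state : String) (user_message : String) (coordinator_resolved : Bool) (school_resolved : Bool) (missing_fields : List String) : String :=
  let msg := PySem.Str.lower user_message
  if pvHas msg ["pause", "stop", "later", "bye", "quit", "not now"] then "paused"
  else
    let gates : List Bool := [true, coordinator_resolved, school_resolved, missing_fields.isEmpty, false, true, false]
    if current_state == "paused" then
      if pvHas msg ["continue", "resume", "ready", "back", "let's go"] then pvResumeScan gates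
      else "paused"
    else if current_state == "pending_approval" then
      if pvHas msg ["yes", "correct", "confirm", "looks good", "that's right", "perfect", "ok", "okay", "submit"] then "approved"
      else if pvHas msg ["no", "wrong", "change", "update", "fix", "actually"] then "drafting_need"
      else current_state
    else if pvPipeline.contains current_state then
      match PySem.List.index? pvPipeline current_state with
      | some i =>
          if gates.getD i false
          then (PySem.List.pyGet? pvPipeline ((i : Int) + 1)).getD current_state
          else current_state
      | none => current_state
    else current_state

-- ===== PRECONDITION & SPEC =====
def Spec_determine_next_need_state (current_state : String) (user_message : String) (coordinator_resolved : Bool) (school_resolved : Bool) (missing_fields : List String) (out : String) : Prop := out = determine_next_need_state_alt current_state user_message coordinator_resolved school_resolved missing_fields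
instance (current_state : String) (user_message : String) (coordinator_resolved : Bool) (school_resolved : Bool) (missing_fields : List String) (out : String) : Decidable (Spec_determine_next_need_state current_state user_message coordinator_resolved school_resolved missing_fields out) := by unfold Spec_determine_next_need_state; infer_instance

-- ===== CLAIM =====
def Claim_equal_determine_next_need_state : Prop := ∀ (current_state : String) (user_message : String) (coordinator_resolved : Bool) (school_resolved : Bool) (missing_fields : List String), Dom_determine_next_need_state current_state user_message coordinator_resolved school_resolved missing_fields → Spec_determine_next_need_state current_state user_message coordinator_resolved school_resolved missing_fields (determine_next_need_state current_state user_message coordinator_resolved school_resolved missing_fields)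

-- ===== LEMMAS AND PROOFS =====

-- ===== VERDICT =====
set_option maxHeartbeats 2000000 in
theorem determine_next_need_state_spec : Claim_equal_determine_next_need_state := by
  intro current_state user_message coordinator_resolved school_resolved missing_fields _
  unfold Spec_determine_next_need_state determine_next_need_state determine_next_need_state_alt
    pvHas pvResumeScan pvPipeline
  by_cases h1 : current_state = "paused"
  · subst h1; simp; split_ifs <;> (try rfl) <;> (try simp_all) <;>
      (cases missing_fields <;> first | rfl | simp_all)
  by_cases h2 : current_state = "initiated"
  · subst h2; simp; split_ifs <;> rfl
  by_cases h3 : current_state = "resolving_coordinator"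
  · subst h3; simp; split_ifs <;> (try rfl) <;> (try simp_all) <;>
      (cases missing_fields <;> first | rfl | simp_all)
  by_cases h4 : current_state = "resolving_school"
  · subst h4; simp; split_ifs <;> (try rfl) <;> (try simp_all) <;>
      (cases missing_fields <;> first | rfl | simp_all)
  by_cases h5 : current_state = "drafting_need"
  · subst h5; simp; split_ifs <;> (try rfl) <;> (try simp_all) <;>
      (cases missing_fields <;> first | rfl | simp_all)
  by_cases h6 : current_state = "pending_approval"
  · subst h6; simp
  by_cases h7 : current_state = "approved"
  · subst h7; simp; split_ifs <;> rfl
  by_cases h8 : current_state = "fulfillment_handoff_ready"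
  · subst h8; simp; split_ifs <;> rfl
  simp [h1, h2, h3, h4, h5, h6, h7, h8]
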